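-- pv_equiv track=rewrite | github.com/janaMXCX/Data-structures-and-algorithms | 考试题目/test1.py | b2ten
-- ===== SOURCE A (Python) =====
-- def b2ten(num, base):
--     ret = 0
--     cnt = 0
--     digit = []
--
--     while num != 0:
--         digit.append(num % 10)
--         num = num // 10
--
--     cnt = len(digit) - 1
--
--     while cnt >= 0:
--         if digit[cnt] >= base:
--             return -1  # 数字超过B进制的数码范围
--         ret = ret * base + digit[cnt]
--         cnt -= 1
--
--     return ret
-- ===== SOURCE B (Python) =====
-- def b2ten(num, base):
--     ret = 0
--     power = 1
--     while num != 0: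
--         d = num % 10
--         if d >= base:
--             return -1
--         ret += d * power
--         power *= base
--         num = num // 10
--     return ret
-- ===== Notes on version B (the rewrite author's own statement) =====
-- stated objective: simpler
-- what changed: One LSB-to-MSB pass accumulating digit*power with a running base power, instead of A's two passes (build a digit list, then Horner over it from the top index).
import Mathlib
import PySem

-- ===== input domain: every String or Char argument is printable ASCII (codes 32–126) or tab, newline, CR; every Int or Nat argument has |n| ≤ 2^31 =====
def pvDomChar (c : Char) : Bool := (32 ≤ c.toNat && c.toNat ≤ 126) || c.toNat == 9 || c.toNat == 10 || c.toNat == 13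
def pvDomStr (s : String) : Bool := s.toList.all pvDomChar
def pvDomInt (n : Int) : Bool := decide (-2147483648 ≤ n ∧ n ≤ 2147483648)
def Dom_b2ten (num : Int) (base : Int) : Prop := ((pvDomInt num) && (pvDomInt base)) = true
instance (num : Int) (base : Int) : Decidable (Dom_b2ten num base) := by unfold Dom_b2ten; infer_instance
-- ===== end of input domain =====

-- B replaces A's two passes (build a digit list, then Horner over it top-down) by one
-- LSB-to-MSB pass accumulating digit*power with a running base power (objective: simpler).

-- ===== PORT A =====
-- first while loop of A: collect num % 10 repeatedly (the `num ≤ 0` guard totalizes it;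
-- Python loops forever for num < 0, which Pre_b2ten excludes; for num = 0 it agrees)
def b2tenDigits (num : Int) : List Int :=
  if h : num ≤ 0 then []
  else PySem.Int.mod num 10 :: b2tenDigits (PySem.Int.floordiv num 10)
termination_by num.toNat
decreasing_by
  have := PySem.Int.floordiv_eq_ediv_of_pos (a := num) (b := 10) (by omega)
  omega

-- second while loop of A: walk the digit list from index len-1 down to 0
def b2tenMSB (ds : List Int) (base : Int) (ret : Int) : Int :=
  match ds with
  | [] => ret
  | d :: t => if d ≥ base then -1 else b2tenMSB t base (ret * base + d)

def b2ten (num : Int) (base : Int) : Int :=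
  b2tenMSB (b2tenDigits num).reverse base 0

-- ===== PORT B =====
-- B's single while loop (the `num ≤ 0` guard totalizes it; Python B loops forever for
-- num < 0, which Pre_b2ten excludes; for num = 0 it agrees)
def b2tenAltLoop (num : Int) (base : Int) (ret : Int) (power : Int) : Int :=
  if h : num ≤ 0 then ret
  else
    let d := PySem.Int.mod num 10
    if d ≥ base then -1
    else b2tenAltLoop (PySem.Int.floordiv num 10) base (ret + d * power) (power * base)
termination_by num.toNat
decreasing_by
  have := PySem.Int.floordiv_eq_ediv_of_pos (a := num) (b := 10) (by omega)
  omega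

def b2ten_alt (num : Int) (base : Int) : Int :=
  b2tenAltLoop num base 0 1

-- ===== PRECONDITION & SPEC =====
-- Pre_ excludes num < 0: there both Pythons loop forever (num // 10 never reaches 0), so A never returns.
def Pre_b2ten (num : Int) (base : Int) : Prop := 0 ≤ num
instance (num : Int) (base : Int) : Decidable (Pre_b2ten num base) := by unfold Pre_b2ten; infer_instance
def pvWitness_b2ten : Int × Int := (1234, 5)

def Spec_b2ten (num : Int) (base : Int) (out : Int) : Prop := out = b2ten_alt num base
instance (num : Int) (base : Int) (out : Int) : Decidable (Spec_b2ten num base out) := by unfold Spec_b2ten; infer_instance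

-- ===== CLAIM (what is proved, stated in full; the proofs are below) =====
def Claim_equal_b2ten : Prop := ∀ (num : Int) (base : Int), Dom_b2ten num base → Pre_b2ten num base → Spec_b2ten num base (b2ten num base)

-- ===== LEMMAS AND PROOFS =====

-- A's second loop, characterised: -1 iff some digit is ≥ base, else the Horner fold.
theorem b2tenMSB_char (ds : List Int) (base : Int) : ∀ ret : Int,
    b2tenMSB ds base ret =
      if ds.any (fun d => base ≤ d) then -1
      else ds.foldl (fun r d => r * base + d) ret := by
  induction ds with
  | nil => intro ret; simp [b2tenMSB]
  | cons d t ih =>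
    intro ret
    by_cases hd : base ≤ d
    · simp [b2tenMSB, hd]
    · simp only [b2tenMSB, ge_iff_le, hd, if_false, ih, List.any_cons, List.foldl_cons,
        decide_eq_true_eq]
      simp [hd]

-- B's loop, characterised against A's digit list.
theorem b2tenAltLoop_char : ∀ (n : Nat) (base ret power : Int),
    b2tenAltLoop (n : Int) base ret power =
      if (b2tenDigits (n : Int)).any (fun d => base ≤ d) then -1
      else ret + power * ((b2tenDigits (n : Int)).reverse.foldl (fun r d => r * base + d) 0) := by
  intro n
  induction n using Nat.strong_induction_on with
  | _ n ih =>
    intro base ret power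
    by_cases hn : n = 0
    · subst hn; rw [b2tenAltLoop, b2tenDigits]; simp
    · have h0 : ¬ ((n : Int) ≤ 0) := by omega
      have hmod : PySem.Int.mod (n : Int) 10 = (n : Int) % 10 :=
        PySem.Int.mod_eq_emod_of_pos (by norm_num)
      have hq : PySem.Int.floordiv (n : Int) 10 = ((n / 10 : Nat) : Int) := by simp
      rw [b2tenAltLoop, b2tenDigits]
      rw [dif_neg h0, dif_neg h0, hmod, hq]
      by_cases hd : base ≤ (n : Int) % 10
      · simp [hd]
      · simp only [ge_iff_le, hd, if_false, List.any_cons, List.reverse_cons, List.foldl_append,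
          List.foldl_cons, List.foldl_nil, decide_eq_true_eq, Bool.or_eq_true, List.any_eq_true,
          decide_false, Bool.false_or, false_or]
        rw [ih (n / 10) (by omega)]
        simp only [List.any_eq_true, decide_eq_true_eq]
        split_ifs with h1
        · rfl
        · ring

-- ===== VERDICT (by name: the statement is the Claim_ definition above) =====
theorem b2ten_spec : Claim_equal_b2ten := by
  intro num base _ hpre
  unfold Spec_b2ten b2ten b2ten_alt
  obtain ⟨n, rfl⟩ : ∃ n : Nat, num = (n : Int) := ⟨num.toNat, (Int.toNat_of_nonneg hpre).symm⟩
  rw [b2tenMSB_char, b2tenAltLoop_char]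
  simp
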